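-- pv_equiv track=rewrite | github.com/idamato/birdgarden | src/wav2freq.py | comprimi_toni
-- ===== SOURCE A (Python) =====
-- def comprimi_toni(lista):
--     if not lista:
--         return []
--
--     ottimizzata = []
--     freq_corrente, durata_totale = lista[0]
--
--     for freq, durata in lista[1:]:
--         if freq == freq_corrente:
--             durata_totale += durata
--         else:
--             ottimizzata.append((freq_corrente, durata_totale))
--             freq_corrente, durata_totale = freq, durata
--
--     ottimizzata.append((freq_corrente, durata_totale))
--     return ottimizzata
-- ===== SOURCE B (Python) =====
-- def comprimi_toni(lista):
--     out = []
--     for freq, durata in reversed(lista):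
--         if out and out[0][0] == freq:
--             out[0] = (freq, durata + out[0][1])
--         else:
--             out.insert(0, (freq, durata))
--     return out
-- ===== Notes on version B (the rewrite author's own statement) =====
-- stated objective: alternative
-- what changed: Builds the compressed list back-to-front: traverses the input in reverse and merges each tone into the head of the already-compressed suffix (a right fold over the output list), instead of a forward pass threading a pending (freq, total) accumulator.
import Mathlib
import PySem

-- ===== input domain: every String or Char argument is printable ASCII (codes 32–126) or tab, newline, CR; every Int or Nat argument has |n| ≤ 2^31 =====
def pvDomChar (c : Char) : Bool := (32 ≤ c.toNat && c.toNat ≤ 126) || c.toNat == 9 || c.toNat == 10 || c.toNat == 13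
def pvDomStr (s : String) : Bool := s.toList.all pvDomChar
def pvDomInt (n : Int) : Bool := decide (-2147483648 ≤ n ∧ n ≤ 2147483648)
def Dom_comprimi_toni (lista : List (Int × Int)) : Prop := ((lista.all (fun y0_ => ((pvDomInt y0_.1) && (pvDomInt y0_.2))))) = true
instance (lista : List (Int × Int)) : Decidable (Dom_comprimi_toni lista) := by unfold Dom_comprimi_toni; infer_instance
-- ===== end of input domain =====

-- B builds the compressed list back-to-front: it traverses the input in reverse
-- and merges each tone into the head of the already-compressed suffix (a right
-- fold over the output), instead of A's forward pass with a pending accumulator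
-- (objective: alternative). Equivalence of return values is proved on all inputs.

-- ===== PORT A =====
def comprimi_toni (lista : List (Int × Int)) : List (Int × Int) :=
  match lista with
  | [] => []
  | (f0, d0) :: rest =>
    let st := rest.foldl
      (fun (s : List (Int × Int) × Int × Int) p =>
        if p.1 == s.2.1 then (s.1, s.2.1, s.2.2 + p.2)
        else (s.1 ++ [(s.2.1, s.2.2)], p.1, p.2))
      ([], f0, d0)
    st.1 ++ [(st.2.1, st.2.2)]

-- ===== PORT B =====
-- Source B iterates over reversed(lista), prepending to / merging into the head of
-- the output list; that loop is exactly a right fold over lista.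
def ctRevStep (p : Int × Int) (out : List (Int × Int)) : List (Int × Int) :=
  match out with
  | (f, d) :: t => if f == p.1 then (f, p.2 + d) :: t else p :: (f, d) :: t
  | [] => [p]

def comprimi_toni_alt (lista : List (Int × Int)) : List (Int × Int) :=
  lista.foldr ctRevStep []

-- ===== PRECONDITION & SPEC =====
def Spec_comprimi_toni (lista : List (Int × Int)) (out : List (Int × Int)) : Prop := out = comprimi_toni_alt lista
instance (lista : List (Int × Int)) (out : List (Int × Int)) : Decidable (Spec_comprimi_toni lista out) := by unfold Spec_comprimi_toni; infer_instance

-- ===== CLAIM (what is proved, stated in full; the proofs are below) =====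
def Claim_equal_comprimi_toni : Prop := ∀ (lista : List (Int × Int)), Dom_comprimi_toni lista → Spec_comprimi_toni lista (comprimi_toni lista)

-- ===== LEMMAS AND PROOFS =====

-- A's loop step, named for the lemmas.
def ctStep (s : List (Int × Int) × Int × Int) (p : Int × Int) :
    List (Int × Int) × Int × Int :=
  if p.1 == s.2.1 then (s.1, s.2.1, s.2.2 + p.2)
  else (s.1 ++ [(s.2.1, s.2.2)], p.1, p.2)

theorem alt_cons (p : Int × Int) (rest : List (Int × Int)) :
    comprimi_toni_alt (p :: rest) = ctRevStep p (comprimi_toni_alt rest) := rfl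

-- B's result on a nonempty input starts with the first frequency.
theorem alt_head (g e : Int) (rest : List (Int × Int)) :
    ∃ x t, comprimi_toni_alt ((g, e) :: rest) = (g, x) :: t := by
  rw [alt_cons]
  cases h : comprimi_toni_alt rest with
  | nil => exact ⟨e, [], rfl⟩
  | cons q t =>
    obtain ⟨f, d⟩ := q
    by_cases hf : f = g
    · subst hf
      exact ⟨e + d, t, by simp [ctRevStep]⟩
    · have hb : (f == g) = false := by simp [hf]
      exact ⟨e, (f, d) :: t, by simp [ctRevStep, hb]⟩

-- Merging two consecutive equal-frequency tones at the head commutes with B.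
theorem alt_merge (f d e : Int) (rest : List (Int × Int)) :
    comprimi_toni_alt ((f, d) :: (f, e) :: rest)
      = comprimi_toni_alt ((f, d + e) :: rest) := by
  rw [alt_cons, alt_cons, alt_cons]
  cases h : comprimi_toni_alt rest with
  | nil => simp [ctRevStep, add_assoc]
  | cons q t =>
    obtain ⟨g, x⟩ := q
    by_cases hg : g = f
    · subst hg; simp [ctRevStep, add_assoc]
    · have hb : (g == f) = false := by simp [hg]
      simp [ctRevStep, hb]

-- B starts a fresh group when the head frequencies differ.
theorem alt_break (f d g e : Int) (rest : List (Int × Int)) (h : g ≠ f) :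
    comprimi_toni_alt ((f, d) :: (g, e) :: rest)
      = (f, d) :: comprimi_toni_alt ((g, e) :: rest) := by
  obtain ⟨x, t, hx⟩ := alt_head g e rest
  rw [alt_cons, hx]
  have hb : (g == f) = false := by simp [h]
  simp [ctRevStep, hb]

-- Loop invariant: A's fold from state (acc, f, d) yields acc ++ B's result on
-- the remaining input prefixed with the pending tone (f, d).
theorem fold_inv (rest : List (Int × Int)) :
    ∀ (acc : List (Int × Int)) (f d : Int),
      (rest.foldl ctStep (acc, f, d)).1
          ++ [((rest.foldl ctStep (acc, f, d)).2.1,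
               (rest.foldl ctStep (acc, f, d)).2.2)]
        = acc ++ comprimi_toni_alt ((f, d) :: rest) := by
  induction rest with
  | nil =>
    intro acc f d
    simp [comprimi_toni_alt, ctRevStep]
  | cons p rest ih =>
    intro acc f d
    obtain ⟨g, e⟩ := p
    by_cases h : g = f
    · subst h
      rw [List.foldl_cons]
      have hstep : ctStep (acc, g, d) (g, e) = (acc, g, d + e) := by
        simp [ctStep]
      rw [hstep, ih, alt_merge]
    · rw [List.foldl_cons]
      have hstep : ctStep (acc, f, d) (g, e) = (acc ++ [(f, d)], g, e) := by
        simp [ctStep, h]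
      rw [hstep, ih, alt_break f d g e rest h, List.append_assoc]
      rfl

-- ===== VERDICT (by name: the statement is the Claim_ definition above) =====
theorem comprimi_toni_spec : Claim_equal_comprimi_toni := by
  intro lista _
  unfold Spec_comprimi_toni
  match lista with
  | [] => rfl
  | (f0, d0) :: rest =>
    show (rest.foldl ctStep ([], f0, d0)).1
        ++ [((rest.foldl ctStep ([], f0, d0)).2.1,
             (rest.foldl ctStep ([], f0, d0)).2.2)]
      = comprimi_toni_alt ((f0, d0) :: rest)
    rw [fold_inv rest [] f0 d0, List.nil_append]
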